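-- pv_equiv track=rewrite | github.com/DioCrafts/qualitycode | src/codeant_agent/infrastructure/explanation/content_generator.py | _add_educational_explanations_english
-- ===== SOURCE A (Python) =====
-- def _add_educational_explanations_english(content: str) -> str:
--     """Agregar explicaciones educativas en inglés."""
--     educational_additions = {
--         "cyclomatic complexity": " (measures how many different paths the code can take)",
--         "refactoring": " (improving code without changing what it does)",
--         "unit test": " (test that verifies a small part of the code)"
--     }
--
--     for term, explanation in educational_additions.items():
--         content = content.replace(term, term + explanation)
--
--     return content
-- ===== SOURCE B (Python) =====
-- def _add_educational_explanations_english(content: str) -> str: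
--     """Agregar explicaciones educativas en inglés."""
--     educational_additions = [
--         ("cyclomatic complexity", " (measures how many different paths the code can take)"),
--         ("refactoring", " (improving code without changing what it does)"),
--         ("unit test", " (test that verifies a small part of the code)"),
--     ]
--
--     out = []
--     i = 0
--     n = len(content)
--     while i < n:
--         for term, explanation in educational_additions:
--             if content.startswith(term, i):
--                 out.append(term)
--                 out.append(explanation)
--                 i += len(term)
--                 break
--         else:
--             out.append(content[i])
--             i += 1
--     return "".join(out)
-- ===== Notes on version B (the rewrite author's own statement) =====
-- stated objective: alternative
-- what changed: Replaces the three sequential full-string str.replace passes by a single left-to-right scan that, at each position, matches any of the three terms against the remaining text and emits term+explanation (or copies one character), building the output once.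
import Mathlib
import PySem

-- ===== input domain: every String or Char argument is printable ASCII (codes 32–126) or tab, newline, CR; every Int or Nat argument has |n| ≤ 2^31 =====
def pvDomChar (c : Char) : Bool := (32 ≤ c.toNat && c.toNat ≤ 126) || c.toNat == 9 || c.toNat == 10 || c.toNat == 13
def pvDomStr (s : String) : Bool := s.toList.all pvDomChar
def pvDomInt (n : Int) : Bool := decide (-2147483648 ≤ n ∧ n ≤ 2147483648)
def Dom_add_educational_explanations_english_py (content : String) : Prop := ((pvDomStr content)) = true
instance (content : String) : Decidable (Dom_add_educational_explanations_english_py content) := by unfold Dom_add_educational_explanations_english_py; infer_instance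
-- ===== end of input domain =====

-- B replaces A's three sequential full-string replace passes by a single left-to-right scan; equivalence is proved unconditionally.

-- ===== PORT A =====
-- the dict of educational additions, in insertion order
def pvEduAdditions : List (String × String) :=
  [("cyclomatic complexity", " (measures how many different paths the code can take)"),
   ("refactoring", " (improving code without changing what it does)"),
   ("unit test", " (test that verifies a small part of the code)")]

-- literal port of A: for term, explanation in dict.items(): content = content.replace(term, term + explanation)
def add_educational_explanations_english_py (content : String) : String :=
  pvEduAdditions.foldl (fun c p => PySem.Str.replace c p.1 (p.1 ++ p.2)) content

-- ===== PORT B =====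
-- B's table; each term is stored as first char :: rest (the terms are nonempty literals,
-- and this split also makes the scanner's termination structural)
def pvScanEnts : List (Char × List Char × List Char) :=
  [('c', "yclomatic complexity".toList, " (measures how many different paths the code can take)".toList),
   ('r', "efactoring".toList, " (improving code without changing what it does)".toList),
   ('u', "nit test".toList, " (test that verifies a small part of the code)".toList)]

-- B's while loop over positions, as recursion over the remaining suffix: at each position the
-- first matching (term, explanation) is emitted and the term's length skipped, else one char is copied
def pvScan (ts : List (Char × List Char × List Char)) : List Char → List Char
  | [] => []
  | c :: s =>
    match ts.find? (fun p => c == p.1 && p.2.1.isPrefixOf s) with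
    | some p => c :: (p.2.1 ++ (p.2.2 ++ pvScan ts (s.drop p.2.1.length)))
    | none => c :: pvScan ts s
  termination_by l => l.length
  decreasing_by all_goals (simp [List.length_drop]; try omega)

def add_educational_explanations_english_py_alt (content : String) : String :=
  String.ofList (pvScan pvScanEnts content.toList)

-- ===== PRECONDITION & SPEC =====
def Spec_add_educational_explanations_english_py (content : String) (out : String) : Prop := out = add_educational_explanations_english_py_alt content
instance (content : String) (out : String) : Decidable (Spec_add_educational_explanations_english_py content out) := by unfold Spec_add_educational_explanations_english_py; infer_instance

-- ===== CLAIM (what is proved, stated in full; the proofs are below) =====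
def Claim_equal_add_educational_explanations_english_py : Prop := ∀ (content : String), Dom_add_educational_explanations_english_py content → Spec_add_educational_explanations_english_py content (add_educational_explanations_english_py content)

-- ===== LEMMAS AND PROOFS =====

-- the full term and the emitted replacement (term ++ explanation) of a table entry
def pvTerm (p : Char × List Char × List Char) : List Char := p.1 :: p.2.1
def pvOut (p : Char × List Char × List Char) : List Char := p.1 :: (p.2.1 ++ p.2.2)

theorem pv_toList_ofList (l : List Char) : (String.ofList l).toList = l := by simp

theorem pv_find?_append_some {α : Type} {f : α → Bool} {l1 : List α} (l2 : List α) {a : α}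
    (h : l1.find? f = some a) : (l1 ++ l2).find? f = some a := by
  induction l1 with
  | nil => simp at h
  | cons x l ih =>
    by_cases hx : f x
    · simp_all [List.find?_cons, hx]
    · simp only [List.find?_cons, hx] at h
      simp only [List.cons_append, List.find?_cons, hx]
      · simpa [hx] using ih h

theorem pv_find?_append_none {α : Type} {f : α → Bool} {l1 : List α} (l2 : List α)
    (h : l1.find? f = none) : (l1 ++ l2).find? f = l2.find? f := by
  induction l1 with
  | nil => simp
  | cons x l ih =>
    by_cases hx : f x
    · simp [List.find?_cons, hx] at h
    · simp only [List.find?_cons, hx] at h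
      simp only [List.cons_append, List.find?_cons, hx]
      simpa [hx] using ih h

-- rewriting equations for pvScan
theorem pvScan_nil (ts : List (Char × List Char × List Char)) : pvScan ts [] = [] := by
  simp [pvScan]

theorem pvScan_cons_some {ts : List (Char × List Char × List Char)} {c : Char} {s : List Char}
    {p : Char × List Char × List Char}
    (h : ts.find? (fun p => c == p.1 && p.2.1.isPrefixOf s) = some p) :
    pvScan ts (c :: s) = c :: (p.2.1 ++ (p.2.2 ++ pvScan ts (s.drop p.2.1.length))) := by
  rw [pvScan, h]

theorem pvScan_cons_none {ts : List (Char × List Char × List Char)} {c : Char} {s : List Char}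
    (h : ts.find? (fun p => c == p.1 && p.2.1.isPrefixOf s) = none) :
    pvScan ts (c :: s) = c :: pvScan ts s := by
  rw [pvScan, h]

-- a term matches at the head iff the find? predicate holds
theorem pvTerm_prefix_iff (p : Char × List Char × List Char) (c : Char) (s : List Char) :
    pvTerm p <+: c :: s ↔ (c == p.1 && p.2.1.isPrefixOf s) = true := by
  unfold pvTerm
  rw [List.cons_prefix_cons]
  simp only [Bool.and_eq_true, beq_iff_eq, List.isPrefixOf_iff_prefix]
  exact and_congr_left' ⟨Eq.symm, Eq.symm⟩

-- comparability of prefixes of the same list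
theorem pv_prefix_cases {α : Type} {l₁ l₂ l₃ : List α} (h1 : l₁ <+: l₃) (h2 : l₂ <+: l₃) :
    l₁ <+: l₂ ∨ l₂ <+: l₁ :=
  List.prefix_or_prefix_of_prefix h1 h2

-- from the decidable no-overlap facts, t cannot start inside p ++ X
theorem pv_noCross {t p : List Char} {X : List Char} {j : ℕ}
    (h1 : ¬ t <+: p.drop j) (h2 : ¬ p.drop j <+: t) : ¬ t <+: (p.drop j ++ X) := by
  intro h
  rcases pv_prefix_cases h (List.prefix_append _ _) with h' | h'
  · exact h1 h'
  · exact h2 h'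

-- skip lemma: if no term of ts can start anywhere inside p (even continuing into X),
-- the scanner copies p verbatim
theorem pvScan_skip (ts : List (Char × List Char × List Char)) (p X : List Char)
    (H : ∀ q ∈ ts, ∀ j < p.length, ¬ pvTerm q <+: (p.drop j ++ X)) :
    pvScan ts (p ++ X) = p ++ pvScan ts X := by
  induction p with
  | nil => simp
  | cons c p' ih =>
    have hnone : ts.find? (fun q => c == q.1 && q.2.1.isPrefixOf (p' ++ X)) = none := by
      rw [List.find?_eq_none]
      intro q hq
      have := H q hq 0 (by simp)
      simp only [List.drop_zero] at this
      simpa [pvTerm_prefix_iff] using this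
    have ih' := ih (by
      intro q hq j hj
      have := H q hq (j + 1) (by simp; omega)
      simpa using this)
    rw [List.cons_append, pvScan_cons_none hnone, ih']
    simp

-- if r (a nonempty suffix of the new term) is not a prefix of s, scanning with ts cannot create it,
-- provided no suffix of the new term is prefix-comparable with any replacement pvOut q
theorem pvScan_noNew (ts : List (Char × List Char × List Char)) (t : List Char)
    (HC : ∀ q ∈ ts, ∀ k < t.length, ¬ t.drop k <+: pvOut q ∧ ¬ pvOut q <+: t.drop k) :
    ∀ (n : ℕ) (s : List Char), s.length ≤ n → ∀ k < t.length, ¬ t.drop k <+: s →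
      ¬ t.drop k <+: pvScan ts s := by
  intro n
  induction n with
  | zero =>
    intro s hs k hk hns
    have : s = [] := List.length_eq_zero_iff.mp (by omega)
    subst this
    simpa [pvScan_nil] using hns
  | succ m ih =>
    intro s hs k hk hns
    match s with
    | [] => simpa [pvScan_nil] using hns
    | c :: s' =>
      cases hfind : ts.find? (fun q => c == q.1 && q.2.1.isPrefixOf s') with
      | some q =>
        have hq : q ∈ ts := List.mem_of_find?_eq_some hfind
        have hpred := List.find?_some hfind
        have hc : c = q.1 := by
          simp only [Bool.and_eq_true, beq_iff_eq] at hpred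
          exact hpred.1
        rw [pvScan_cons_some hfind]
        intro habs
        have hout : (c :: (q.2.1 ++ (q.2.2 ++ pvScan ts (s'.drop q.2.1.length))))
            = pvOut q ++ pvScan ts (s'.drop q.2.1.length) := by
          simp [pvOut, hc]
        rw [hout] at habs
        rcases pv_prefix_cases habs (List.prefix_append _ _) with h' | h'
        · exact (HC q hq k hk).1 h'
        · exact (HC q hq k hk).2 h'
      | none =>
        rw [pvScan_cons_none hfind]
        have hne : t.drop k ≠ [] := by
          intro h
          exact hns (h ▸ List.nil_prefix)
        obtain ⟨r0, r', hr⟩ := List.exists_cons_of_ne_nil hne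
        intro habs
        rw [hr, List.cons_prefix_cons] at habs
        obtain ⟨hr0, habs'⟩ := habs
        have hdrop : t.drop (k + 1) = r' := by
          have h1 : (t.drop k).drop 1 = r' := by rw [hr]; rfl
          rw [← h1, List.drop_drop]
        by_cases hk1 : k + 1 < t.length
        · have hnotp : ¬ t.drop (k+1) <+: s' := by
            rw [hdrop]
            intro h
            apply hns
            rw [hr, hr0]
            exact List.cons_prefix_cons.mpr ⟨rfl, h⟩
          have := ih s' (by simp at hs; omega) (k+1) hk1 hnotp
          rw [hdrop] at this
          exact this habs'
        · -- k+1 = t.length, so r' = [] and t.drop k = [r0] <+: c :: s' holds, contradicting hns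
          have hnil : t.drop (k+1) = [] := by
            apply List.drop_eq_nil_of_le; omega
          rw [hdrop] at hnil
          apply hns
          rw [hr, hr0, hnil]
          simp [List.cons_prefix_cons]

-- composing: scanning the single new entry q after scanning with ts is one scan with ts ++ [q],
-- under the decidable disjointness conditions between q and the entries of ts
theorem pvScan_compose (ts : List (Char × List Char × List Char))
    (q : Char × List Char × List Char)
    (HA : ∀ p ∈ ts, ∀ j < (pvOut p).length, ¬ pvTerm q <+: (pvOut p).drop j ∧ ¬ (pvOut p).drop j <+: pvTerm q)
    (HB : ∀ p ∈ ts, ∀ j < (pvTerm q).length, ¬ pvTerm p <+: (pvTerm q).drop j ∧ ¬ (pvTerm q).drop j <+: pvTerm p)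
    (HC : ∀ p ∈ ts, ∀ k < (pvTerm q).length, ¬ (pvTerm q).drop k <+: pvOut p ∧ ¬ pvOut p <+: (pvTerm q).drop k) :
    ∀ (n : ℕ) (s : List Char), s.length ≤ n →
      pvScan [q] (pvScan ts s) = pvScan (ts ++ [q]) s := by
  intro n
  induction n with
  | zero =>
    intro s hs
    have : s = [] := List.length_eq_zero_iff.mp (by omega)
    subst this
    simp [pvScan_nil]
  | succ m ih =>
    intro s hs
    match s with
    | [] => simp [pvScan_nil]
    | c :: s' =>
      cases hfind : ts.find? (fun p => c == p.1 && p.2.1.isPrefixOf s') with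
      | some p =>
        have hp : p ∈ ts := List.mem_of_find?_eq_some hfind
        have hpred := List.find?_some hfind
        have hc : c = p.1 := by
          simp only [Bool.and_eq_true, beq_iff_eq] at hpred
          exact hpred.1
        have hfind' : (ts ++ [q]).find? (fun p => c == p.1 && p.2.1.isPrefixOf s') = some p :=
          pv_find?_append_some _ hfind
        rw [pvScan_cons_some hfind, pvScan_cons_some hfind']
        have hout : (c :: (p.2.1 ++ (p.2.2 ++ pvScan ts (s'.drop p.2.1.length))))
            = pvOut p ++ pvScan ts (s'.drop p.2.1.length) := by
          simp [pvOut, hc]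
        rw [hout]
        rw [pvScan_skip [q] (pvOut p) _ (by
          intro q' hq' j hj
          have : q' = q := by simpa using hq'
          subst this
          exact pv_noCross (HA p hp j hj).1 (HA p hp j hj).2)]
        rw [ih (s'.drop p.2.1.length) (by
          have := List.length_drop (l := s') (i := p.2.1.length)
          simp at hs
          omega)]
        simp [pvOut, hc]
      | none =>
        by_cases hqm : pvTerm q <+: c :: s'
        · -- the new entry q matches at the head
          obtain ⟨s2, hs2⟩ := hqm
          have hq1 : q.1 = c := by
            have := congrArg (fun l => l.head?) hs2
            simpa [pvTerm] using this
          have hrest : q.2.1 ++ s2 = s' := by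
            have := congrArg List.tail hs2
            simpa [pvTerm] using this
          have hskip : pvScan ts (c :: s') = pvTerm q ++ pvScan ts s2 := by
            rw [← hs2]
            apply pvScan_skip
            intro p hp j hj
            exact pv_noCross (HB p hp j hj).1 (HB p hp j hj).2
          rw [hskip]
          have hlist : pvTerm q ++ pvScan ts s2 = q.1 :: (q.2.1 ++ pvScan ts s2) := by
            simp [pvTerm]
          have hfq : [q].find? (fun p => q.1 == p.1 && p.2.1.isPrefixOf (q.2.1 ++ pvScan ts s2)) = some q := by
            simp [List.find?_cons, List.isPrefixOf_iff_prefix, List.prefix_append]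
          rw [hlist, pvScan_cons_some hfq, List.drop_left]
          have hs2len : s2.length ≤ m := by
            have : s'.length ≤ m := by simp at hs; omega
            have h2 : s2.length ≤ s'.length := by
              rw [← hrest]; simp
            omega
          rw [ih s2 hs2len]
          -- RHS
          have hfq' : (ts ++ [q]).find? (fun p => c == p.1 && p.2.1.isPrefixOf s') = some q := by
            rw [pv_find?_append_none _ hfind]
            have hpref : q.2.1 <+: s' := ⟨s2, hrest⟩
            simp [List.find?_cons, List.isPrefixOf_iff_prefix, hq1, hpref]
          rw [pvScan_cons_some hfq']
          have hdrop2 : s'.drop q.2.1.length = s2 := by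
            rw [← hrest, List.drop_left]
          rw [hdrop2, hq1]
        · -- no entry matches at the head
          have hnonew : ¬ pvTerm q <+: pvScan ts (c :: s') := by
            have := pvScan_noNew ts (pvTerm q) HC (c :: s').length (c :: s') le_rfl 0
              (by simp [pvTerm]) (by simpa using hqm)
            simpa using this
          rw [pvScan_cons_none hfind] at hnonew ⊢
          have hfq_none : [q].find? (fun p => c == p.1 && p.2.1.isPrefixOf (pvScan ts s')) = none := by
            rw [List.find?_eq_none]
            intro p hp
            have : p = q := by simpa using hp
            subst this
            simpa [pvTerm_prefix_iff] using hnonew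
          rw [pvScan_cons_none hfq_none]
          rw [ih s' (by simp at hs; omega)]
          have hfq'' : (ts ++ [q]).find? (fun p => c == p.1 && p.2.1.isPrefixOf s') = none := by
            rw [pv_find?_append_none _ hfind, List.find?_eq_none]
            intro p hp
            have : p = q := by simpa using hp
            subst this
            simpa [pvTerm_prefix_iff] using hqm
          rw [pvScan_cons_none hfq'']

-- go of Chars.replace, with old = t0 :: tr and new = old ++ e, is the single-entry scanner
theorem pv_go_eq_scan (t0 : Char) (tr e : List Char) :
    ∀ (fuel : ℕ) (l acc : List Char), l.length ≤ fuel →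
      PySem.Chars.replace.go (t0 :: tr) ((t0 :: tr) ++ e) fuel l acc
        = acc.reverse ++ pvScan [(t0, tr, e)] l := by
  intro fuel
  induction fuel with
  | zero =>
    intro l acc hl
    have : l = [] := List.length_eq_zero_iff.mp (by omega)
    subst this
    simp [PySem.Chars.replace.go, pvScan_nil]
  | succ m ih =>
    intro l acc hl
    match l with
    | [] => simp [PySem.Chars.replace.go, pvScan_nil]
    | c :: t =>
      by_cases hp : (t0 :: tr).isPrefixOf (c :: t) = true
      · have hsplit : (t0 == c && tr.isPrefixOf t) = true := by
          simpa [List.isPrefixOf] using hp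
        have hc : t0 = c := by
          simp only [Bool.and_eq_true, beq_iff_eq] at hsplit
          exact hsplit.1
        have htr : tr.isPrefixOf t = true := by
          simp only [Bool.and_eq_true] at hsplit
          exact hsplit.2
        have hgo : PySem.Chars.replace.go (t0 :: tr) ((t0 :: tr) ++ e) (m+1) (c :: t) acc
            = PySem.Chars.replace.go (t0 :: tr) ((t0 :: tr) ++ e) m ((c :: t).drop (t0 :: tr).length)
                (((t0 :: tr) ++ e).reverse ++ acc) := by
          rw [PySem.Chars.replace.go]
          simp [hp]
        have hdl : ((c :: t).drop (t0 :: tr).length) = t.drop tr.length := by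
          simp
        have hlen : (t.drop tr.length).length ≤ m := by
          have := List.length_drop (l := t) (i := tr.length)
          simp at hl
          omega
        rw [hgo, hdl, ih _ _ hlen]
        have hfind : ([(t0, tr, e)].find? (fun p => c == p.1 && p.2.1.isPrefixOf t)) = some (t0, tr, e) := by
          simp [List.find?_cons, hc, htr]
        rw [pvScan_cons_some hfind]
        simp [hc]
      · have hgo : PySem.Chars.replace.go (t0 :: tr) ((t0 :: tr) ++ e) (m+1) (c :: t) acc
            = PySem.Chars.replace.go (t0 :: tr) ((t0 :: tr) ++ e) m t (c :: acc) := by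
          rw [PySem.Chars.replace.go]
          simp [hp]
        have hfind : ([(t0, tr, e)].find? (fun p => c == p.1 && p.2.1.isPrefixOf t)) = none := by
          have : ¬ (t0 == c && tr.isPrefixOf t) = true := by
            intro h
            exact hp (by simpa [List.isPrefixOf] using h)
          simp only [List.find?_cons]
          simp only [Bool.and_eq_true, beq_iff_eq] at this ⊢
          split
          · rename_i hcond
            exfalso
            apply this
            simp only [Bool.and_eq_true, beq_iff_eq] at hcond
            exact ⟨hcond.1.symm, hcond.2⟩
          · rfl
        rw [hgo, ih _ _ (by simp at hl; omega), pvScan_cons_none hfind]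
        simp
      
-- Chars.replace with a nonempty old equals the single-entry scanner
theorem pv_replace_eq_scan (t0 : Char) (tr e l : List Char) :
    PySem.Chars.replace l (t0 :: tr) ((t0 :: tr) ++ e) = pvScan [(t0, tr, e)] l := by
  rw [PySem.Chars.replace]
  simp only [List.isEmpty_cons, if_neg]
  exact pv_go_eq_scan t0 tr e l.length l [] le_rfl

-- ===== VERDICT (by name: the statement is the Claim_ definition above) =====
theorem add_educational_explanations_english_py_spec : Claim_equal_add_educational_explanations_english_py := by
  intro content _
  unfold Spec_add_educational_explanations_english_py
  unfold add_educational_explanations_english_py pvEduAdditions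
  unfold add_educational_explanations_english_py_alt pvScanEnts
  simp only [List.foldl_cons, List.foldl_nil]
  rw [PySem.Str.replace, PySem.Str.replace, PySem.Str.replace]
  rw [pv_toList_ofList, pv_toList_ofList]
  have e1 : ("cyclomatic complexity" : String).toList = 'c' :: "yclomatic complexity".toList := rfl
  have n1 : ("cyclomatic complexity" ++ " (measures how many different paths the code can take)" : String).toList
      = ('c' :: "yclomatic complexity".toList) ++ " (measures how many different paths the code can take)".toList := rfl
  have e2 : ("refactoring" : String).toList = 'r' :: "efactoring".toList := rfl
  have n2 : ("refactoring" ++ " (improving code without changing what it does)" : String).toList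
      = ('r' :: "efactoring".toList) ++ " (improving code without changing what it does)".toList := rfl
  have e3 : ("unit test" : String).toList = 'u' :: "nit test".toList := rfl
  have n3 : ("unit test" ++ " (test that verifies a small part of the code)" : String).toList
      = ('u' :: "nit test".toList) ++ " (test that verifies a small part of the code)".toList := rfl
  rw [e1, n1, e2, n2, e3, n3]
  rw [pv_replace_eq_scan, pv_replace_eq_scan, pv_replace_eq_scan]
  rw [pvScan_compose [('c', "yclomatic complexity".toList, " (measures how many different paths the code can take)".toList)]
        ('r', "efactoring".toList, " (improving code without changing what it does)".toList)
        (by decide) (by decide) (by decide) _ _ le_rfl]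
  simp only [List.cons_append, List.nil_append]
  rw [pvScan_compose [('c', "yclomatic complexity".toList, " (measures how many different paths the code can take)".toList),
        ('r', "efactoring".toList, " (improving code without changing what it does)".toList)]
        ('u', "nit test".toList, " (test that verifies a small part of the code)".toList)
        (by decide) (by decide) (by decide) _ _ le_rfl]
  simp only [List.cons_append, List.nil_append]
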